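-- pv_equiv track=rewrite | github.com/jerryxu20/kattis | spideydistance.py | spidey
-- ===== SOURCE A (Python) =====
-- def spidey(r, n):
--     # for each (l, r) pair we save 0.5 units
--     # binary search the max ls we can have
--     ans = 0
--     low = 0
--     high = 10 ** 6
--     while low <= high:
--         mid = (low + high)//2
--         pairs = min(mid, r)
--         cost = r + mid - min(mid, r)//2
--         if cost > n:
--             high = mid - 1
--         else:
--             ans = mid
--             low = mid + 1
--     return ans
-- ===== SOURCE B (Python) =====
-- def spidey(r, n):
--     cap = 10 ** 6
--     # Region mid > r: cost = r + mid - r//2, so mid <= n - r + r//2.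
--     c2 = min(cap, n - r + r // 2)
--     if c2 > r and c2 >= 0:
--         return c2
--     # Region 0 <= mid <= r: cost = r + mid - mid//2, so mid <= 2*(n - r).
--     c1 = min(r, cap, 2 * (n - r))
--     return max(c1, 0)
-- ===== Notes on version B (the rewrite author's own statement) =====
-- stated objective: alternative
-- what changed: Replaces the binary search over [0,10^6] with a closed-form maximum derived from the two monotone pieces of the cost function (mid>r gives mid<=n-r+r//2, mid<=r gives mid<=2*(n-r)), clamped to [0,10^6].
import Mathlib
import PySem

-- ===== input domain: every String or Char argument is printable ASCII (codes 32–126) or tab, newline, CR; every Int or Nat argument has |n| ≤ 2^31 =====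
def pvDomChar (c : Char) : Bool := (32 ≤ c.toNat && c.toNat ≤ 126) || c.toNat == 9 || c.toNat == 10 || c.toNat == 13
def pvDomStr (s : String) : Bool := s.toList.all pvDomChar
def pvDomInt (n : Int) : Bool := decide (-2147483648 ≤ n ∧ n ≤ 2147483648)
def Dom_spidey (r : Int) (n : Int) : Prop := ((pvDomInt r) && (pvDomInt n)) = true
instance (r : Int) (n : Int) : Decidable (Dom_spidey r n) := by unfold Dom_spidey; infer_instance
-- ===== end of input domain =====

-- B replaces A's binary search by a closed-form maximum over the two pieces of the monotone cost; objective: alternative (loop-free closed form).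

-- ===== PORT A =====
-- literal port of A's while loop (state ans, low, high)
def spideyLoop (r n ans low high : Int) : Int :=
  if h : low ≤ high then
    let mid := PySem.Int.floordiv (low + high) 2
    let _pairs := min mid r
    let cost := r + mid - PySem.Int.floordiv (min mid r) 2
    if cost > n then spideyLoop r n ans low (mid - 1)
    else spideyLoop r n mid (mid + 1) high
  else ans
termination_by (high + 1 - low).toNat
decreasing_by
  all_goals
    have hb := PySem.Int.floordiv_two_mid_bounds h
    omega

def spidey (r : Int) (n : Int) : Int := spideyLoop r n 0 0 (10 ^ 6)

-- ===== PORT B =====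
def spidey_alt (r : Int) (n : Int) : Int :=
  let cap : Int := 10 ^ 6
  let c2 := min cap (n - r + PySem.Int.floordiv r 2)
  if c2 > r ∧ c2 ≥ 0 then c2
  else max (min r (min cap (2 * (n - r)))) 0

-- ===== PRECONDITION & SPEC =====
def Spec_spidey (r : Int) (n : Int) (out : Int) : Prop := out = spidey_alt r n
instance (r : Int) (n : Int) (out : Int) : Decidable (Spec_spidey r n out) := by unfold Spec_spidey; infer_instance

-- ===== CLAIM (what is proved, stated in full; the proofs are below) =====
def Claim_equal_spidey : Prop := ∀ (r : Int) (n : Int), Dom_spidey r n → Spec_spidey r n (spidey r n)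

-- ===== LEMMAS AND PROOFS =====

-- feasibility predicate: cost of choosing mid is within n
def Feas (r n m : Int) : Prop := r + m - (min m r) / 2 ≤ n

theorem floordiv_two (a : Int) : PySem.Int.floordiv a 2 = a / 2 :=
  PySem.Int.floordiv_eq_ediv_of_pos (by omega)

-- B's result M satisfies: 0 ≤ M ≤ 10^6, (Feas M or M = 0), and no m in (M, 10^6] is feasible
theorem alt_eq (r n : Int) : spidey_alt r n =
    (if min (10 ^ 6 : Int) (n - r + r / 2) > r ∧ min (10 ^ 6 : Int) (n - r + r / 2) ≥ 0
      then min (10 ^ 6 : Int) (n - r + r / 2)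
      else max (min r (min (10 ^ 6 : Int) (2 * (n - r)))) 0) := by
  simp [spidey_alt]

theorem alt_char (r n : Int) :
    0 ≤ spidey_alt r n ∧ spidey_alt r n ≤ 10 ^ 6 ∧
    (Feas r n (spidey_alt r n) ∨ spidey_alt r n = 0) ∧
    (∀ m, spidey_alt r n < m → m ≤ 10 ^ 6 → ¬ Feas r n m) := by
  unfold Feas
  rw [alt_eq]
  split_ifs with hc
  · refine ⟨by omega, by omega, Or.inl ?_, fun m h1 h2 hf => ?_⟩
    · have : min (min (10 ^ 6 : Int) (n - r + r / 2)) r = r := by omega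
      omega
    · have : min m r = r := by omega
      omega
  · refine ⟨by omega, by omega, ?_, fun m h1 h2 hf => ?_⟩
    · by_cases h0 : (0:Int) < min r (min (10 ^ 6) (2 * (n - r)))
      · left
        have hm : min (max (min r (min (10 ^ 6 : Int) (2 * (n - r)))) 0) r
            = max (min r (min (10 ^ 6 : Int) (2 * (n - r)))) 0 := by omega
        omega
      · right; omega
    · rcases le_or_gt m r with hmr | hmr
      · have : min m r = m := by omega
        omega
      · have : min m r = r := by omega
        omega

-- feasibility is downward closed
theorem feas_mono (r n m m' : Int) (h : m' ≤ m) (hf : Feas r n m) : Feas r n m' := by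
  unfold Feas at *; omega

-- loop invariant ⇒ loop returns B's value
theorem loop_correct (r n : Int) : ∀ ans low high : Int,
    0 ≤ low → high ≤ 10 ^ 6 →
    (∀ m, high < m → m ≤ 10 ^ 6 → ¬ Feas r n m) →
    ((ans = 0 ∧ low = 0) ∨ (Feas r n ans ∧ ans + 1 = low ∧ 0 ≤ ans ∧ ans ≤ 10 ^ 6)) →
    spideyLoop r n ans low high = spidey_alt r n := by
  intro ans low high
  induction' hw : (high + 1 - low).toNat using Nat.strong_induction_on with k ih generalizing ans low high
  intro hlow hhigh hup hans
  obtain ⟨hM0, hMcap, hMfeas, hMup⟩ := alt_char r n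
  rw [spideyLoop]
  split_ifs with h
  · have hb := PySem.Int.floordiv_two_mid_bounds h
    set mid := PySem.Int.floordiv (low + high) 2 with hmid
    have hfd : r + mid - PySem.Int.floordiv (min mid r) 2 = r + mid - (min mid r) / 2 := by
      rw [floordiv_two]
    simp only [hfd]
    split_ifs with hcost
    · -- infeasible at mid: high := mid - 1
      refine ih _ (by omega) ans low (mid - 1) rfl hlow (by omega) ?_ hans
      intro m hm1 hm2 hf
      rcases le_or_gt m high with hmh | hmh
      · exact absurd (feas_mono r n m mid (by omega) hf) (by unfold Feas; omega)
      · exact hup m hmh hm2 hf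
    · -- feasible at mid: ans := mid, low := mid + 1
      refine ih _ (by omega) mid (mid + 1) high rfl (by omega) hhigh hup ?_
      right
      exact ⟨by unfold Feas; omega, rfl, by omega, by omega⟩
  · -- low > high: result is ans; show ans = spidey_alt r n
    rcases hans with ⟨ha0, hl0⟩ | ⟨hfa, hl, ha0, hacap⟩
    · -- everything in [0, 10^6] infeasible
      rcases hMfeas with hf | hz
      · exact absurd hf (hup _ (by omega) hMcap)
      · omega
    · by_contra hne
      rcases lt_trichotomy ans (spidey_alt r n) with hlt | heq | hgt
      · rcases hMfeas with hf | hz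
        · exact hup _ (by omega) hMcap hf
        · omega
      · exact hne heq
      · exact hMup ans hgt hacap hfa

-- ===== VERDICT (by name: the statement is the Claim_ definition above) =====
theorem spidey_spec : Claim_equal_spidey := by
  intro r n _
  unfold Spec_spidey spidey
  exact loop_correct r n 0 0 (10 ^ 6) (by omega) (by omega)
    (fun m h1 h2 _ => absurd h1 (by omega)) (Or.inl ⟨rfl, rfl⟩)
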